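-- pv_equiv track=rewrite | github.com/12shipsDevelopment/data-universe | scraping/coordinator.py | next_tag
-- ===== SOURCE A (Python) =====
-- def next_tag(tag: str):
--     chars = list(tag)
--     i = len(chars) - 1
--
--     while i >= 0:
--         if chars[i] != 'z':
--             chars[i] = chr(ord(chars[i]) + 1)
--             break
--         else:
--             chars[i] = 'a'
--             if i == 0:
--                 chars.insert(0, 'a')
--             i -= 1
--
--     return ''.join(chars)
-- ===== SOURCE B (Python) =====
-- def next_tag(tag: str):
--     # boundary scan: find last index j whose char is not 'z', then one slice build
--     j = len(tag) - 1
--     while j >= 0 and tag[j] == 'z':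
--         j -= 1
--     if j < 0:
--         return 'a' * (len(tag) + 1) if tag else ''
--     return tag[:j] + chr(ord(tag[j]) + 1) + 'a' * (len(tag) - 1 - j)
-- ===== Notes on version B (the rewrite author's own statement) =====
-- stated objective: alternative
-- what changed: Replaces A's char-list mutation loop (build list, mutate in place, insert, join) by a boundary scan for the last non-'z' index followed by a single slice/chr/repeat construction.
import Mathlib
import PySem

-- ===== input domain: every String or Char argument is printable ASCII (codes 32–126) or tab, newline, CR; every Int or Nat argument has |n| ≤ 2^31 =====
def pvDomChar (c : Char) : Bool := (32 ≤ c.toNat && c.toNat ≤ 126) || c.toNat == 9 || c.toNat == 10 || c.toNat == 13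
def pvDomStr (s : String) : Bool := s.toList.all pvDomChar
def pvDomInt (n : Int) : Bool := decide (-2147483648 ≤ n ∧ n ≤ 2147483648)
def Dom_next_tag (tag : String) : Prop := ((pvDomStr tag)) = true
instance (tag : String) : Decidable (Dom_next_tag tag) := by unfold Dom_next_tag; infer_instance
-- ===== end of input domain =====

-- B replaces A's mutate-in-place carry loop by a boundary scan plus one slice/repeat build; same cost, different decomposition.

-- ===== PORT A =====
-- A walks i from the right, mutating the char list: a non-'z' is incremented and the
-- loop breaks; a 'z' becomes 'a' and the walk continues, inserting a leading 'a' when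
-- the carry passes position 0.  The walk over decreasing i is the recursion below over
-- the reversed char list (goA r = the mutated suffix, reversed).
def goA : List Char → List Char
  | [] => ['a']                         -- carry past i = 0: chars.insert(0, 'a')
  | c :: rest =>
    if c == 'z' then 'a' :: goA rest    -- chars[i] = 'a'; i -= 1
    else Char.ofNat (c.toNat + 1) :: rest  -- chars[i] = chr(ord(chars[i]) + 1); break

def next_tag (tag : String) : String :=
  let chars := tag.toList
  if chars.isEmpty then ""              -- empty: the while loop body never runs
  else String.mk ((goA chars.reverse).reverse)

-- ===== PORT B =====
-- Source B scans from the right while tag[j] == 'z' (here: takeWhile/drop on the reversed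
-- list), then builds tag[:j] + chr(ord(tag[j])+1) + 'a' * (len(tag)-1-j) in one go.
def next_tag_alt (tag : String) : String :=
  let r := tag.toList.reverse
  let tz := (r.takeWhile (· == 'z')).length   -- number of trailing 'z's
  match r.drop tz with
  | [] =>                                     -- j < 0: all chars are 'z'
    if r.isEmpty then "" else String.mk (List.replicate (r.length + 1) 'a')
  | c :: rest =>                              -- c = tag[j], rest.reverse = tag[:j]
    String.mk (rest.reverse ++ Char.ofNat (c.toNat + 1) :: List.replicate tz 'a')

-- ===== PRECONDITION & SPEC =====
def Spec_next_tag (tag : String) (out : String) : Prop := out = next_tag_alt tag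
instance (tag : String) (out : String) : Decidable (Spec_next_tag tag out) := by unfold Spec_next_tag; infer_instance

-- ===== CLAIM (what is proved, stated in full; the proofs are below) =====
def Claim_equal_next_tag : Prop := ∀ (tag : String), Dom_next_tag tag → Spec_next_tag tag (next_tag tag)

-- ===== LEMMAS AND PROOFS =====

theorem goA_eq (r : List Char) :
    goA r = List.replicate (r.takeWhile (· == 'z')).length 'a' ++
      (match r.drop (r.takeWhile (· == 'z')).length with
       | [] => ['a']
       | c :: rest => Char.ofNat (c.toNat + 1) :: rest) := by
  induction r with
  | nil => simp [goA]
  | cons c rest ih =>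
    by_cases h : c == 'z'
    · simp [goA, List.takeWhile, h, List.replicate, ih]
    · simp [goA, List.takeWhile, h]

theorem next_tag_spec : Claim_equal_next_tag := by
  intro tag _
  unfold Spec_next_tag next_tag next_tag_alt
  by_cases h : tag.toList.isEmpty
  · simp [h]
    simp [List.isEmpty_iff] at h
    simp [h]
  · simp [h, goA_eq]
    simp [List.isEmpty_iff] at h
    set r := tag.toList.reverse with hr
    have hre : ¬ r.isEmpty := by simp [hr, List.isEmpty_iff, h]
    cases hd : r.drop (r.takeWhile (· == 'z')).length with
    | nil =>
      -- all chars are 'z'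
      have htw : (r.takeWhile (· == 'z')).length = r.length := by
        have := List.length_drop (l := r) (i := (r.takeWhile (· == 'z')).length)
        rw [hd] at this
        simp at this
        have h2 := (List.takeWhile_sublist (p := (· == 'z')) (l := r)).length_le
        omega
      rw [show (List.takeWhile (· == 'z') r).length = r.length from htw]
      simp [hr, List.replicate_succ]
    | cons c rest =>
      simp
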